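-- pv_equiv track=rewrite | github.com/dakota-jamie-sims/OpenAI-Learning-Center-Agent | src/services/kb_search.py | _parse_article_results
-- ===== SOURCE A (Python) =====
-- from typing import List, Dict, Any, Optional, Tuple
--
-- def _parse_article_results(results_text: str) -> List[Dict[str, Any]]:
--     """Parse article results from search text"""
--     # Simple parsing - in production, this would be more sophisticated
--     articles = []
--     lines = results_text.split('\n')
--
--     current_article = {}
--     for line in lines:
--         if line.strip().startswith('Article:') or line.strip().startswith('Title:'):
--             if current_article:
--                 articles.append(current_article)
--             current_article = {"title": line.replace('Article:', '').replace('Title:', '').strip()}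
--         elif line.strip() and current_article:
--             if 'summary' not in current_article:
--                 current_article['summary'] = line.strip()
--             else:
--                 current_article['summary'] += ' ' + line.strip()
--
--     if current_article:
--         articles.append(current_article)
--
--     return articles[:3]  # Return top 3 articles
-- ===== SOURCE B (Python) =====
-- def _is_boundary(line):
--     s = line.strip()
--     return s.startswith('Article:') or s.startswith('Title:')
--
--
-- def _blocks(lines):
--     """Split lines into blocks, each starting at a boundary (title) line;
--     lines before the first boundary are dropped."""
--     blocks = []
--     while lines and not _is_boundary(lines[0]):
--         lines = lines[1:]
--     while lines:
--         head, rest = lines[0], lines[1:]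
--         k = 0
--         while k < len(rest) and not _is_boundary(rest[k]):
--             k += 1
--         blocks.append([head] + rest[:k])
--         lines = rest[k:]
--     return blocks
--
--
-- def _article(block):
--     art = {"title": block[0].replace('Article:', '').replace('Title:', '').strip()}
--     body = [ln.strip() for ln in block[1:] if ln.strip()]
--     if body:
--         art["summary"] = ' '.join(body)
--     return art
--
--
-- def _parse_article_results(results_text):
--     return [_article(b) for b in _blocks(results_text.split('\n'))][:3]
-- ===== Notes on version B (the rewrite author's own statement) =====
-- stated objective: alternative
-- what changed: A builds articles in one stateful pass mutating a current_article dict; B first cuts the line list into title-delimited blocks (dropping pre-title lines) and then maps each block independently to its article dict, truncating to three.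
import Mathlib
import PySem

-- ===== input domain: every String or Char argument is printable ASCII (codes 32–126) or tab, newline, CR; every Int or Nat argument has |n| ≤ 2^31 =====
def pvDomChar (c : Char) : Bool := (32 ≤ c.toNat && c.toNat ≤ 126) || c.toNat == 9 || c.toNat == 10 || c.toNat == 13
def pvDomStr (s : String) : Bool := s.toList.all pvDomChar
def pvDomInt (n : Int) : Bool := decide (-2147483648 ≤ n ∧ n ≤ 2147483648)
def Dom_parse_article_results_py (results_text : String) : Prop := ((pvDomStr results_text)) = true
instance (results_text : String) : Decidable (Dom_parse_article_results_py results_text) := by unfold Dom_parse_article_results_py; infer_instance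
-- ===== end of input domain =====

-- B re-implements A as split-into-title-blocks then map-to-article (objective: alternative decomposition);
-- same return value on every input (A is total).

-- ===== PORT A =====
-- A's loop test `line.strip().startswith('Article:') or line.strip().startswith('Title:')`
def pvIsTitleA (line : String) : Bool :=
  PySem.Str.startswith (PySem.Str.strip line) "Article:" ||
  PySem.Str.startswith (PySem.Str.strip line) "Title:"

-- `line.replace('Article:', '').replace('Title:', '').strip()`
def pvTitleA (line : String) : String :=
  PySem.Str.strip (PySem.Str.replace (PySem.Str.replace line "Article:" "") "Title:" "")

-- one iteration of A's `for line in lines` loop; state = (articles, current_article)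
def pvStepA (st : List (PySem.Dict String String) × PySem.Dict String String) (line : String) :
    List (PySem.Dict String String) × PySem.Dict String String :=
  if pvIsTitleA line then
    ((if st.2.size ≠ 0 then st.1 ++ [st.2] else st.1),
     PySem.Dict.empty.insert "title" (pvTitleA line))
  else if (PySem.Str.strip line != "") && (st.2.size != 0) then
    (st.1,
     if st.2.contains "summary" = false then st.2.insert "summary" (PySem.Str.strip line)
     -- `current_article['summary'] += ' ' + line.strip()` (key present in this branch)
     else st.2.insert "summary" (st.2.getD "summary" "" ++ " " ++ PySem.Str.strip line))
  else st

def parse_article_results_py (results_text : String) : List (List (String × String)) :=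
  -- `results_text.split('\n')`: sep ≠ "" so split? is always `some`
  let lines := (PySem.Str.split? results_text "\n").getD []
  let st := lines.foldl pvStepA ([], PySem.Dict.empty)
  let articles := if st.2.size ≠ 0 then st.1 ++ [st.2] else st.1
  -- `articles[:3]` with nonnegative literal stop = take 3; dicts returned as item lists
  (articles.map (fun d => d.items)).take 3

-- ===== PORT B =====
def pvIsTitleB (line : String) : Bool :=
  PySem.Str.startswith (PySem.Str.strip line) "Article:" ||
  PySem.Str.startswith (PySem.Str.strip line) "Title:"

-- `_blocks`: drop leading non-title lines, then cut a block `[head] + rest[:k]`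
-- (k = number of leading non-title lines of rest, i.e. takeWhile/dropWhile) and recurse on `rest[k:]`
def pvBlocksB : List String → List (List String)
  | [] => []
  | l :: ls =>
    if pvIsTitleB l then
      (l :: ls.takeWhile (fun x => !pvIsTitleB x)) :: pvBlocksB (ls.dropWhile (fun x => !pvIsTitleB x))
    else pvBlocksB ls
termination_by ls => ls.length
decreasing_by
  · have := List.length_dropWhile_le (fun x => !pvIsTitleB x) ls; simp; omega
  · simp

-- `_article`
def pvArticleB : List String → List (String × String)
  | [] => []   -- unreachable: every block produced by pvBlocksB is nonempty
  | l :: rest =>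
    let body := (rest.filter (fun ln => PySem.Str.strip ln != "")).map PySem.Str.strip
    ("title", PySem.Str.strip (PySem.Str.replace (PySem.Str.replace l "Article:" "") "Title:" ""))
      :: (if body = [] then [] else [("summary", PySem.Str.join " " body)])

def parse_article_results_py_alt (results_text : String) : List (List (String × String)) :=
  ((pvBlocksB ((PySem.Str.split? results_text "\n").getD [])).map pvArticleB).take 3

-- ===== PRECONDITION & SPEC =====
def Spec_parse_article_results_py (results_text : String) (out : List (List (String × String))) : Prop := out = parse_article_results_py_alt results_text
instance (results_text : String) (out : List (List (String × String))) : Decidable (Spec_parse_article_results_py results_text out) := by unfold Spec_parse_article_results_py; infer_instance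

-- ===== CLAIM (what is proved, stated in full; the proofs are below) =====
def Claim_equal_parse_article_results_py : Prop := ∀ (results_text : String), Dom_parse_article_results_py results_text → Spec_parse_article_results_py results_text (parse_article_results_py results_text)

-- ===== LEMMAS AND PROOFS =====

-- A's current_article is always {} / {title} / {title, summary}; model the last two:
def pvCur (t : String) : Option String → PySem.Dict String String
  | none => PySem.Dict.empty.insert "title" t
  | some s => (PySem.Dict.empty.insert "title" t).insert "summary" s

def pvArtOf (t : String) : Option String → List (String × String)
  | none => [("title", t)]
  | some s => [("title", t), ("summary", s)]

-- effect of one non-title line on the optional summary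
def pvExt (s? : Option String) (line : String) : Option String :=
  if PySem.Str.strip line != "" then
    some (match s? with
          | none => PySem.Str.strip line
          | some s => s ++ " " ++ PySem.Str.strip line)
  else s?

-- A's post-loop flush, already mapped to item lists
def pvFinal (st : List (PySem.Dict String String) × PySem.Dict String String) :
    List (List (String × String)) :=
  (if st.2.size ≠ 0 then st.1 ++ [st.2] else st.1).map (fun d => d.items)

def pvJoinF (b : String) (bs : List String) : String :=
  bs.foldl (fun acc x => acc ++ " " ++ x) b

def pvBody (tl : List String) : List String :=
  (tl.filter (fun ln => PySem.Str.strip ln != "")).map PySem.Str.strip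

theorem pvStr_ext {s t : String} (h : s.toList = t.toList) : s = t := by
  have := congrArg String.ofList h; simpa using this

theorem pvCur_items (t : String) (s? : Option String) : (pvCur t s?).items = pvArtOf t s? := by
  cases s? <;> rfl

theorem pvCur_size (t : String) (s? : Option String) : (pvCur t s?).size ≠ 0 := by
  cases s? with
  | none => simp [show (pvCur t none).size = 1 from rfl]
  | some s => simp [show (pvCur t (some s)).size = 2 from rfl]

theorem pvStepA_title {l : String} (h : pvIsTitleA l = true)
    (arts : List (PySem.Dict String String)) (t : String) (s? : Option String) :
    pvStepA (arts, pvCur t s?) l = (arts ++ [pvCur t s?], pvCur (pvTitleA l) none) := by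
  have hs := pvCur_size t s?
  simp only [pvStepA, h, if_true]
  rw [if_pos hs]
  rfl

theorem pvStepA_nontitle {l : String} (h : pvIsTitleA l = false)
    (arts : List (PySem.Dict String String)) (t : String) (s? : Option String) :
    pvStepA (arts, pvCur t s?) l = (arts, pvCur t (pvExt s? l)) := by
  by_cases hb : PySem.Str.strip l != ""
  · cases s? <;> simp [pvStepA, h, pvExt, hb, pvCur] <;> rfl
  · cases s? <;> simp [pvStepA, h, pvExt, hb]

theorem pvJoinF_shift (bs : List String) (p q : String) :
    pvJoinF (p ++ " " ++ q) bs = p ++ " " ++ pvJoinF q bs := by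
  induction bs generalizing q with
  | nil => rfl
  | cons b bs ih =>
      simp only [pvJoinF, List.foldl_cons] at *
      rw [show p ++ " " ++ q ++ " " ++ b = p ++ " " ++ (q ++ " " ++ b) by
            apply pvStr_ext; simp, ih]

theorem pvJoin_eq (bs : List String) (b : String) :
    PySem.Str.join " " (b :: bs) = pvJoinF b bs := by
  induction bs generalizing b with
  | nil =>
      apply pvStr_ext
      simp [PySem.Str.toList_join, PySem.Chars.join_singleton, pvJoinF]
  | cons b' bs ih =>
      have h1 : PySem.Str.join " " (b :: b' :: bs) = b ++ " " ++ PySem.Str.join " " (b' :: bs) := by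
        apply pvStr_ext
        simp [PySem.Str.toList_join, PySem.Chars.join_cons_cons]
      rw [h1, ih]
      simp only [pvJoinF, List.foldl_cons]
      have h2 := pvJoinF_shift bs b b'
      simp only [pvJoinF] at h2
      exact h2.symm

theorem pvExt_some (tl : List String) (s : String) :
    tl.foldl pvExt (some s) = some (pvJoinF s (pvBody tl)) := by
  induction tl generalizing s with
  | nil => rfl
  | cons l tl ih =>
      by_cases hb : PySem.Str.strip l != ""
      · rw [List.foldl_cons,
          show pvExt (some s) l = some (s ++ " " ++ PySem.Str.strip l) from by simp [pvExt, hb],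
          show pvBody (l :: tl) = PySem.Str.strip l :: pvBody tl from by
            simp [pvBody, hb],
          ih]
        simp only [pvJoinF, List.foldl_cons]
      · rw [List.foldl_cons,
          show pvExt (some s) l = some s from by simp [pvExt, hb],
          show pvBody (l :: tl) = pvBody tl from by simp [pvBody, hb]]
        exact ih s

theorem pvExt_none (tl : List String) :
    tl.foldl pvExt none =
      match pvBody tl with
      | [] => none
      | b :: bs => some (pvJoinF b bs) := by
  induction tl with
  | nil => rfl
  | cons l tl ih =>
      by_cases hb : PySem.Str.strip l != ""
      · rw [List.foldl_cons,
          show pvExt none l = some (PySem.Str.strip l) from by simp [pvExt, hb],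
          show pvBody (l :: tl) = PySem.Str.strip l :: pvBody tl from by
            simp [pvBody, hb],
          pvExt_some]
      · rw [List.foldl_cons,
          show pvExt none l = none from by simp [pvExt, hb],
          show pvBody (l :: tl) = pvBody tl from by simp [pvBody, hb]]
        exact ih

theorem pvArticleB_eq (l : String) (tl : List String) :
    pvArticleB (l :: tl) = pvArtOf (pvTitleA l) (tl.foldl pvExt none) := by
  simp only [pvArticleB]
  rw [show (tl.filter (fun ln => PySem.Str.strip ln != "")).map PySem.Str.strip = pvBody tl
        from rfl,
      pvExt_none]
  cases hB : pvBody tl with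
  | nil => simp [pvArtOf, pvTitleA]
  | cons b bs => simp [pvArtOf, pvTitleA, pvJoin_eq]

theorem pvBlocksB_nil : pvBlocksB [] = [] := by
  rw [pvBlocksB.eq_def]

theorem pvBlocksB_cons (l : String) (ls : List String) :
    pvBlocksB (l :: ls) =
      if pvIsTitleB l then
        (l :: ls.takeWhile (fun x => !pvIsTitleB x))
          :: pvBlocksB (ls.dropWhile (fun x => !pvIsTitleB x))
      else pvBlocksB ls := by
  rw [pvBlocksB.eq_def]

theorem pvMainA (ls : List String) (arts : List (PySem.Dict String String))
    (t : String) (s? : Option String) :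
    pvFinal (ls.foldl pvStepA (arts, pvCur t s?))
      = arts.map (fun d => d.items)
        ++ pvArtOf t ((ls.takeWhile (fun x => !pvIsTitleB x)).foldl pvExt s?)
        :: (pvBlocksB (ls.dropWhile (fun x => !pvIsTitleB x))).map pvArticleB := by
  induction ls generalizing arts t s? with
  | nil =>
      simp [pvFinal, pvCur_size t s?, pvCur_items, pvBlocksB_nil]
  | cons l ls ih =>
      cases hB : pvIsTitleB l with
      | true =>
          have hA : pvIsTitleA l = true := hB
          rw [List.foldl_cons, pvStepA_title hA, ih, List.takeWhile_cons, List.dropWhile_cons]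
          simp only [hB, Bool.not_true, Bool.false_eq_true, if_false]
          rw [pvBlocksB_cons]
          simp [hB, pvCur_items, pvArticleB_eq, List.map_append]
      | false =>
          have hA : pvIsTitleA l = false := hB
          rw [List.foldl_cons, pvStepA_nontitle hA, ih, List.takeWhile_cons, List.dropWhile_cons]
          simp [hB]

theorem pvStartA (ls : List String) :
    pvFinal (ls.foldl pvStepA ([], PySem.Dict.empty)) = (pvBlocksB ls).map pvArticleB := by
  induction ls with
  | nil =>
      simp [pvFinal, pvBlocksB_nil,
        show (PySem.Dict.empty : PySem.Dict String String).size = 0 from rfl]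
  | cons l ls ih =>
      cases hB : pvIsTitleB l with
      | true =>
          have hA : pvIsTitleA l = true := hB
          have hstep : pvStepA ([], PySem.Dict.empty) l = ([], pvCur (pvTitleA l) none) := by
            simp [pvStepA, hA, PySem.Dict.empty, PySem.Dict.size, pvCur]
          rw [List.foldl_cons, hstep, pvMainA, pvBlocksB_cons]
          simp [hB, pvArticleB_eq]
      | false =>
          have hA : pvIsTitleA l = false := hB
          have hstep : pvStepA ([], PySem.Dict.empty) l = ([], PySem.Dict.empty) := by
            simp [pvStepA, hA, PySem.Dict.empty, PySem.Dict.size]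
          rw [List.foldl_cons, hstep, ih, pvBlocksB_cons]
          simp [hB]

-- ===== VERDICT (by name: the statement is the Claim_ definition above) =====
theorem parse_article_results_py_spec : Claim_equal_parse_article_results_py := by
  intro results_text _
  unfold Spec_parse_article_results_py parse_article_results_py parse_article_results_py_alt
  rw [← pvStartA]
  rfl
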